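-- pv_equiv track=rewrite | github.com/samankhan3210/py110 | lesson_3/tic_tac_toe.py | get_diagonal_coordinates
-- ===== SOURCE A (Python) =====
-- BOARD_LENGTH = 3
--
-- def get_diagonal_coordinates(board, mark, max_move_len):
--     ''' same as get_horizontal_coordinates() but it checks but
--     it returns the diagonal coordinates of the player '''
--     diagonal_1 = []
--     diagonal_2 = []
--     for i in range(BOARD_LENGTH):
--         if board[i][i] == mark:
--             diagonal_1.append((i, i))
--
--         if board[i][BOARD_LENGTH - 1 - i]  == mark:
--             diagonal_2.append((i, BOARD_LENGTH - 1 - i))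
--
--         if board[i][i] not in [mark, " "]:
--             diagonal_1 = []
--
--         if board[i][BOARD_LENGTH - 1 - i] not in [mark, " "]:
--             diagonal_2 = []
--
--     if len(diagonal_1) == max_move_len:
--         return diagonal_1
--
--     if len(diagonal_2) == max_move_len:
--         return diagonal_2
--
--     return []
-- ===== SOURCE B (Python) =====
-- BOARD_LENGTH = 3
--
-- def get_diagonal_coordinates(board, mark, max_move_len):
--     def surviving(coords):
--         cells = [(c, board[c[0]][c[1]]) for c in coords]
--         last_block = -1
--         for idx, (_, v) in enumerate(cells):
--             if v != mark and v != " ":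
--                 last_block = idx
--         return [c for idx, (c, v) in enumerate(cells)
--                 if idx > last_block and v == mark]
--
--     diagonal_1 = surviving([(i, i) for i in range(BOARD_LENGTH)])
--     diagonal_2 = surviving([(i, BOARD_LENGTH - 1 - i) for i in range(BOARD_LENGTH)])
--
--     if len(diagonal_1) == max_move_len:
--         return diagonal_1
--     if len(diagonal_2) == max_move_len:
--         return diagonal_2
--     return []
-- ===== Notes on version B (the rewrite author's own statement) =====
-- stated objective: alternative
-- what changed: Replaces A's stateful scan that appends matches and resets the accumulator at each blocker by a non-destructive computation: build the (coordinate, value) pairs of each diagonal, find the index of the last blocking cell, and keep the matching coordinates strictly after it; the final tie-break is unchanged.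
import Mathlib
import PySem

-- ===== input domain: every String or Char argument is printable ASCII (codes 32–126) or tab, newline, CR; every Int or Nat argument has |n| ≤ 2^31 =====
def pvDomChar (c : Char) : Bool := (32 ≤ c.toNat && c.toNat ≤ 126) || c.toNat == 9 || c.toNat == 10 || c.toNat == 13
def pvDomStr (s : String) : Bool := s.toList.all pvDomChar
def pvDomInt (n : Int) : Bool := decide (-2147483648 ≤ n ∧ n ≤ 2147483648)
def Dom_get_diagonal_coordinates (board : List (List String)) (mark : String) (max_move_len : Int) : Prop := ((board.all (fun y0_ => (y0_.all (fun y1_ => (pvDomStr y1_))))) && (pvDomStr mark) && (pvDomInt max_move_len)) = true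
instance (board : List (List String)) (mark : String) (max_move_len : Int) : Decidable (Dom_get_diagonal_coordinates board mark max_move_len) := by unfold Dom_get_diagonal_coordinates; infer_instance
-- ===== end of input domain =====

-- B replaces A's append-and-reset accumulator scan of each diagonal by a last-blocker index plus a filter (alternative decomposition, same cost); Pre_ excludes exactly the boards on which A's indexing raises IndexError.


-- ===== PORT A =====
-- board[i][j]; the getD defaults are never reached under Pre_ (Python raises there).
def pvCellA (board : List (List String)) (i j : Int) : String :=
  (PySem.List.pyGet? ((PySem.List.pyGet? board i).getD []) j).getD ""

-- literal transliteration of A: one loop over range(3), two accumulators,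
-- append on match, reset to [] on a blocker, then the tie-break.
def get_diagonal_coordinates (board : List (List String)) (mark : String) (max_move_len : Int) : List (Int × Int) :=
  let st := (PySem.List.pyRange 0 3 1).foldl
    (fun (st : List (Int × Int) × List (Int × Int)) (i : Int) =>
      let d1 := if pvCellA board i i = mark then st.1 ++ [(i, i)] else st.1
      let d2 := if pvCellA board i (3 - 1 - i) = mark then st.2 ++ [(i, 3 - 1 - i)] else st.2
      let d1 := if ¬ (pvCellA board i i = mark ∨ pvCellA board i i = " ") then [] else d1
      let d2 := if ¬ (pvCellA board i (3 - 1 - i) = mark ∨ pvCellA board i (3 - 1 - i) = " ") then [] else d2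
      (d1, d2))
    ([], [])
  if (st.1.length : Int) = max_move_len then st.1
  else if (st.2.length : Int) = max_move_len then st.2
  else []

-- ===== PORT B =====
def pvCellB (board : List (List String)) (i j : Int) : String :=
  (PySem.List.pyGet? ((PySem.List.pyGet? board i).getD []) j).getD ""

-- B's 'surviving' on the built (coordinate, value) pairs: last blocker index, then filter.
def pvSurvCells (mark : String) (cells : List ((Int × Int) × String)) : List (Int × Int) :=
  let lastBlock : Int := (PySem.List.enumerate cells).foldl
    (fun acc p => if p.2.2 ≠ mark ∧ p.2.2 ≠ " " then p.1 else acc) (-1)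
  (PySem.List.enumerate cells).filterMap
    (fun p => if p.1 > lastBlock ∧ p.2.2 = mark then some p.2.1 else none)

def pvSurviving (board : List (List String)) (mark : String) (coords : List (Int × Int)) : List (Int × Int) :=
  pvSurvCells mark (coords.map (fun c => (c, pvCellB board c.1 c.2)))

def get_diagonal_coordinates_alt (board : List (List String)) (mark : String) (max_move_len : Int) : List (Int × Int) :=
  let diagonal_1 := pvSurviving board mark ((PySem.List.pyRange 0 3 1).map (fun i => (i, i)))
  let diagonal_2 := pvSurviving board mark ((PySem.List.pyRange 0 3 1).map (fun i => (i, 3 - 1 - i)))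
  if (diagonal_1.length : Int) = max_move_len then diagonal_1
  else if (diagonal_2.length : Int) = max_move_len then diagonal_2
  else []

-- ===== PRECONDITION & SPEC =====
-- Pre_ holds exactly where A returns: A indexes rows 0..2 at columns i and 2-i, so rows 0 and 2
-- need length ≥ 3 and row 1 needs length ≥ 2; on every other board A raises IndexError.
def Pre_get_diagonal_coordinates (board : List (List String)) (mark : String) (max_move_len : Int) : Prop :=
  3 ≤ board.length ∧ 3 ≤ (board.getD 0 []).length ∧ 2 ≤ (board.getD 1 []).length ∧ 3 ≤ (board.getD 2 []).length
instance (board : List (List String)) (mark : String) (max_move_len : Int) : Decidable (Pre_get_diagonal_coordinates board mark max_move_len) := by unfold Pre_get_diagonal_coordinates; infer_instance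

def pvWitness_get_diagonal_coordinates : List (List String) × String × Int :=
  ([["X", "O", " "], [" ", "X", "O"], ["O", " ", "X"]], "X", 3)

def Spec_get_diagonal_coordinates (board : List (List String)) (mark : String) (max_move_len : Int) (out : List (Int × Int)) : Prop := out = get_diagonal_coordinates_alt board mark max_move_len
instance (board : List (List String)) (mark : String) (max_move_len : Int) (out : List (Int × Int)) : Decidable (Spec_get_diagonal_coordinates board mark max_move_len out) := by unfold Spec_get_diagonal_coordinates; infer_instance

-- ===== CLAIM (what is proved, stated in full; the proofs are below) =====
def Claim_equal_get_diagonal_coordinates : Prop := ∀ (board : List (List String)) (mark : String) (max_move_len : Int), Dom_get_diagonal_coordinates board mark max_move_len → Pre_get_diagonal_coordinates board mark max_move_len → Spec_get_diagonal_coordinates board mark max_move_len (get_diagonal_coordinates board mark max_move_len)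

-- ===== LEMMAS AND PROOFS =====

-- evaluating the five board cells the two ports read (board destructured far enough for each)
lemma cA00 (x0 : String) (t : List String) (rs : List (List String)) :
    pvCellA ((x0 :: t) :: rs) 0 0 = x0 := by
  simp only [pvCellA, PySem.List.pyGet?, PySem.List.pyIdx?]; split_ifs <;> simp_all

lemma cA11 (y0 y1 : String) (t : List String) (r0 : List String) (rs : List (List String)) :
    pvCellA (r0 :: (y0 :: y1 :: t) :: rs) 1 1 = y1 := by
  simp only [pvCellA, PySem.List.pyGet?, PySem.List.pyIdx?]; split_ifs <;> simp_all

lemma cA22 (z0 z1 z2 : String) (t : List String) (r0 r1 : List String) (rs : List (List String)) :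
    pvCellA (r0 :: r1 :: (z0 :: z1 :: z2 :: t) :: rs) 2 2 = z2 := by
  simp only [pvCellA, PySem.List.pyGet?, PySem.List.pyIdx?]; split_ifs <;> simp_all <;> omega

lemma cA02 (x0 x1 x2 : String) (t : List String) (rs : List (List String)) :
    pvCellA ((x0 :: x1 :: x2 :: t) :: rs) 0 2 = x2 := by
  simp only [pvCellA, PySem.List.pyGet?, PySem.List.pyIdx?]; split_ifs <;> simp_all <;> omega

lemma cA20 (z0 : String) (t : List String) (r0 r1 : List String) (rs : List (List String)) :
    pvCellA (r0 :: r1 :: (z0 :: t) :: rs) 2 0 = z0 := by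
  simp only [pvCellA, PySem.List.pyGet?, PySem.List.pyIdx?]; split_ifs <;> simp_all <;> omega

lemma cB00 (x0 : String) (t : List String) (rs : List (List String)) :
    pvCellB ((x0 :: t) :: rs) 0 0 = x0 := by
  simp only [pvCellB, PySem.List.pyGet?, PySem.List.pyIdx?]; split_ifs <;> simp_all

lemma cB11 (y0 y1 : String) (t : List String) (r0 : List String) (rs : List (List String)) :
    pvCellB (r0 :: (y0 :: y1 :: t) :: rs) 1 1 = y1 := by
  simp only [pvCellB, PySem.List.pyGet?, PySem.List.pyIdx?]; split_ifs <;> simp_all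

lemma cB22 (z0 z1 z2 : String) (t : List String) (r0 r1 : List String) (rs : List (List String)) :
    pvCellB (r0 :: r1 :: (z0 :: z1 :: z2 :: t) :: rs) 2 2 = z2 := by
  simp only [pvCellB, PySem.List.pyGet?, PySem.List.pyIdx?]; split_ifs <;> simp_all <;> omega

lemma cB02 (x0 x1 x2 : String) (t : List String) (rs : List (List String)) :
    pvCellB ((x0 :: x1 :: x2 :: t) :: rs) 0 2 = x2 := by
  simp only [pvCellB, PySem.List.pyGet?, PySem.List.pyIdx?]; split_ifs <;> simp_all <;> omega

lemma cB20 (z0 : String) (t : List String) (r0 r1 : List String) (rs : List (List String)) :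
    pvCellB (r0 :: r1 :: (z0 :: t) :: rs) 2 0 = z0 := by
  simp only [pvCellB, PySem.List.pyGet?, PySem.List.pyIdx?]; split_ifs <;> simp_all <;> omega

-- A's three append-or-reset steps on one diagonal equal B's last-blocker filter on its three cells.
lemma key (mark v0 v1 v2 : String) (p0 p1 p2 : Int × Int) :
    (if ¬v2 = mark ∧ ¬v2 = " " then []
     else if v2 = mark then
       (if ¬v1 = mark ∧ ¬v1 = " " then []
        else if v1 = mark then (if ¬v0 = mark ∧ ¬v0 = " " then [] else if v0 = mark then [p0] else []) ++ [p1]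
        else if ¬v0 = mark ∧ ¬v0 = " " then [] else if v0 = mark then [p0] else []) ++ [p2]
     else
       if ¬v1 = mark ∧ ¬v1 = " " then []
       else if v1 = mark then (if ¬v0 = mark ∧ ¬v0 = " " then [] else if v0 = mark then [p0] else []) ++ [p1]
       else if ¬v0 = mark ∧ ¬v0 = " " then [] else if v0 = mark then [p0] else [])
    = pvSurvCells mark [(p0, v0), (p1, v1), (p2, v2)] := by
  by_cases h0 : v0 = mark <;> by_cases g0 : v0 = " " <;> by_cases h1 : v1 = mark <;>
    by_cases g1 : v1 = " " <;> by_cases h2 : v2 = mark <;> by_cases g2 : v2 = " " <;>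
    simp_all [pvSurvCells, PySem.List.enumerate_cons, PySem.List.enumerate_nil]

-- ===== VERDICT (by name: the statement is the Claim_ definition above) =====
theorem get_diagonal_coordinates_spec : Claim_equal_get_diagonal_coordinates := by
  intro board mark m _ hpre
  unfold Spec_get_diagonal_coordinates
  obtain ⟨hb, h0, h1, h2⟩ := hpre
  rcases board with _ | ⟨r0, _ | ⟨r1, _ | ⟨r2, rest⟩⟩⟩ <;> simp at hb
  simp only [List.getD] at h0 h1 h2
  rcases r0 with _ | ⟨a0, _ | ⟨a1, _ | ⟨a2, t0⟩⟩⟩ <;> simp at h0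
  rcases r1 with _ | ⟨b0, _ | ⟨b1, t1⟩⟩ <;> simp at h1
  rcases r2 with _ | ⟨c0, _ | ⟨c1, _ | ⟨c2, t2⟩⟩⟩ <;> simp at h2
  have hr : PySem.List.pyRange 0 3 1 = [0, 1, 2] := by decide
  simp only [get_diagonal_coordinates, get_diagonal_coordinates_alt, pvSurviving, hr,
    List.foldl, List.map]
  norm_num
  rw [cA00, cA11, cA22, cA02, cA20, cB00, cB11, cB22, cB02, cB20]
  rw [key mark a0 b1 c2 (0, 0) (1, 1) (2, 2), key mark a2 b1 c0 (0, 2) (1, 1) (2, 0)]
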